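-- pv_equiv track=rewrite | github.com/frydaykg/graphCompression | common.py | getTournirGraph
-- ===== SOURCE A (Python) =====
-- def getTournirGraph(n):
-- 	a = []
-- 	for i in range(n):
-- 		a.append([0] * n)
-- 	for i in range(n - 1):
-- 		for j in range(i + 1, n):
-- 			a[i][j] = 1
-- 	return a
-- ===== SOURCE B (Python) =====
-- def getTournirGraph(n):
-- 	a = []
-- 	row = [1] * n
-- 	for _ in range(n):
-- 		row = [0] + row[:-1]
-- 		a.append(row)
-- 	return a
-- ===== Notes on version B (the rewrite author's own statement) =====
-- stated objective: alternative
-- what changed: Instead of allocating an n-by-n zero matrix and then flipping the upper triangle with a nested loop, B maintains a single sliding row (starting as all ones) and derives each successive row from the previous one by prepending a 0 and dropping the last element, appending each fresh shifted row.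
import Mathlib
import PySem

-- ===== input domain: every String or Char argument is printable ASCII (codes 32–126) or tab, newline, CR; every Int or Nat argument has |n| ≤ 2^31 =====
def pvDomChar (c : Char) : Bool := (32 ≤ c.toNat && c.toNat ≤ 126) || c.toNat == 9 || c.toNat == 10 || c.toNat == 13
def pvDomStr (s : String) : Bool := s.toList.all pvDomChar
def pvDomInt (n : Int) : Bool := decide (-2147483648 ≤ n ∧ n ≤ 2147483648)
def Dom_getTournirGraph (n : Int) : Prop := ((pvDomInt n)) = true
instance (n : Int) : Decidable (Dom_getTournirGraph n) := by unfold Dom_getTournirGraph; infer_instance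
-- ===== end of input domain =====

-- B replaces A's zero-fill-then-flip-the-upper-triangle nested loops by a sliding row: each
-- row is derived from the previous one by prepending a 0 and dropping the last element
-- (objective: alternative decomposition, same cost).

-- ===== PORT A =====
-- '[0] * n' = List.replicate n.toNat 0 (Python repetition with a non-positive count is []);
-- 'a[i][j] = 1' = a.modify i.toNat (·.set j.toNat 1) — exact here since 0 ≤ i < n ≤ len(a) and i < j < n hold on every iteration.
def getTournirGraph (n : Int) : List (List Int) :=
  let a0 := (PySem.List.pyRange 0 n 1).foldl (fun a _ => a ++ [List.replicate n.toNat 0]) []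
  (PySem.List.pyRange 0 (n - 1) 1).foldl (fun a i =>
    (PySem.List.pyRange (i + 1) n 1).foldl (fun a j =>
      a.modify i.toNat (fun row => row.set j.toNat 1)) a) a0

-- ===== PORT B =====
-- '[1] * n' = List.replicate n.toNat 1; 'row[:-1]' = PySem.List.slice row none (some (-1));
-- the loop state is the pair (a, row).
def getTournirGraph_alt (n : Int) : List (List Int) :=
  ((PySem.List.pyRange 0 n 1).foldl
    (fun (p : List (List Int) × List Int) _ =>
      let row := 0 :: PySem.List.slice p.2 none (some (-1))
      (p.1 ++ [row], row))
    ([], List.replicate n.toNat 1)).1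

-- ===== PRECONDITION & SPEC =====
def Spec_getTournirGraph (n : Int) (out : List (List Int)) : Prop := out = getTournirGraph_alt n
instance (n : Int) (out : List (List Int)) : Decidable (Spec_getTournirGraph n out) := by unfold Spec_getTournirGraph; infer_instance

-- ===== CLAIM (what is proved, stated in full; the proofs are below) =====
def Claim_equal_getTournirGraph : Prop := ∀ (n : Int), Dom_getTournirGraph n → Spec_getTournirGraph n (getTournirGraph n)

-- ===== LEMMAS AND PROOFS =====

-- the common closed form both ports are proved equal to: row i of the n×n matrix
def pvRow (m i : Nat) : List Int := List.replicate (i + 1) 0 ++ List.replicate (m - i - 1) 1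

-- modifying the same index twice composes
lemma pv_modify_modify (a : List (List Int)) (i : Nat) (f g : List Int → List Int) :
    (a.modify i f).modify i g = a.modify i (fun x => g (f x)) := by
  apply List.ext_getElem?
  intro j
  simp only [List.getElem?_modify]
  cases a[j]? with
  | none => simp
  | some v =>
    simp only [Option.map_eq_map, Option.map_some]
    split <;> simp

-- a fold of per-element modifications of one fixed row collapses to one modification of that row
lemma pv_foldl_modify (L : List Int) (a : List (List Int)) (i : Nat)
    (f : Int → List Int → List Int) :
    L.foldl (fun a j => a.modify i (f j)) a
      = a.modify i (fun r => L.foldl (fun r j => f j r) r) := by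
  induction L generalizing a with
  | nil => exact (List.modify_id i a).symm
  | cons x xs ih =>
    simp only [List.foldl_cons]
    rw [ih, pv_modify_modify]

-- setting consecutive tail positions of a row to 1
lemma pv_sets (t : Nat) : ∀ (p : Nat) (row : List Int), p + t = row.length →
    (List.range t).foldl (fun r k => r.set (p + k) 1) row
      = row.take p ++ List.replicate t 1 := by
  induction t with
  | zero =>
    intro p row h
    simp only [List.range_zero, List.foldl_nil, List.replicate_zero, List.append_nil]
    rw [List.take_of_length_le (by omega)]
  | succ t ih =>
    intro p row h
    rw [List.range_succ_eq_map, List.foldl_cons, List.foldl_map]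
    have hfun : (fun (r : List Int) (k : Nat) => r.set (p + Nat.succ k) 1)
        = (fun (r : List Int) (k : Nat) => r.set ((p + 1) + k) 1) := by
      funext r k; congr 1; omega
    simp only [Nat.add_zero]
    rw [hfun, ih (p + 1) (row.set p 1) (by simp; omega)]
    have hp : p < row.length := by omega
    have htake : (row.set p 1).take (p + 1) = row.take p ++ [1] := by
      rw [List.take_add_one, List.take_set_of_le (by omega)]
      simp [hp]
    rw [htake, List.append_assoc]
    simp [List.replicate_succ]

-- the fold that modifies rows 0..t-1, read back one row at a time
lemma pv_fold_modify_getElem (t : Nat) (a : List (List Int)) (F : Nat → List Int → List Int) :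
    ∀ (i : Nat),
    ((List.range t).foldl (fun a k => a.modify k (F k)) a)[i]?
      = if i < t then F i <$> a[i]? else a[i]? := by
  induction t with
  | zero => intro i; simp
  | succ t ih =>
    intro i
    rw [List.range_succ, List.foldl_append, List.foldl_cons, List.foldl_nil,
      List.getElem?_modify, ih i]
    by_cases h1 : t = i
    · subst h1
      rw [if_neg (Nat.lt_irrefl t), if_pos (Nat.lt_succ_self t)]
      cases a[t]? <;> simp
    · by_cases h2 : i < t
      · rw [if_pos h2, if_pos (by omega)]
        cases a[i]? <;> simp [h1]
      · rw [if_neg h2, if_neg (by omega)]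
        cases a[i]? <;> simp [h1]

-- A equals the closed-form matrix
lemma pv_A_closed (n : Int) :
    getTournirGraph n = (List.range n.toNat).map (pvRow n.toNat) := by
  unfold getTournirGraph
  rw [PySem.List.foldl_append_singleton_eq_map]
  simp only [List.nil_append, List.map_const', PySem.List.length_pyRange_one, Int.sub_zero]
  rw [PySem.List.pyRange_one 0 (n - 1), List.foldl_map]
  have hstep : (fun (a : List (List Int)) (k : Nat) =>
      (PySem.List.pyRange ((0 : Int) + ↑k + 1) n 1).foldl
        (fun a j => a.modify ((0 : Int) + ↑k).toNat (fun row => row.set j.toNat 1)) a)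
      = (fun (a : List (List Int)) (k : Nat) =>
        a.modify k (fun r =>
          (PySem.List.pyRange (↑k + 1) n 1).foldl (fun r j => r.set j.toNat 1) r)) := by
    funext a k
    rw [pv_foldl_modify]
    simp
  rw [hstep]
  apply List.ext_getElem?
  intro i
  rw [pv_fold_modify_getElem]
  simp only [Int.sub_zero, List.getElem?_map, List.getElem?_replicate]
  by_cases hi : i < (n - 1).toNat
  · have hin : i < n.toNat := by omega
    rw [if_pos hi, if_pos hin, List.getElem?_range hin]
    simp only [Option.map_eq_map, Option.map_some]
    congr 1
    rw [PySem.List.pyRange_one (↑i + 1) n, List.foldl_map]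
    have hfun : (fun (r : List Int) (k : Nat) => r.set (↑i + 1 + ↑k : Int).toNat 1)
        = (fun (r : List Int) (k : Nat) => r.set ((i + 1) + k) 1) := by
      funext r k
      congr 1
    rw [hfun, pv_sets _ (i + 1) _ (by simp; omega), List.take_replicate]
    unfold pvRow
    have hmin : min (i + 1) n.toNat = i + 1 := by omega
    have hcnt : (n - (↑i + 1)).toNat = n.toNat - i - 1 := by omega
    rw [hmin, hcnt]
  · rw [if_neg hi]
    by_cases hin : i < n.toNat
    · rw [if_pos hin, List.getElem?_range hin]
      simp only [Option.map_some]
      congr 1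
      unfold pvRow
      have h1 : n.toNat - i - 1 = 0 := by omega
      have h2 : i + 1 = n.toNat := by omega
      rw [h1, h2]
      simp
    · rw [if_neg hin, List.getElem?_eq_none (by simp; omega)]
      simp

-- B's sliding-row fold: invariant after t steps (t ≤ m)
lemma pv_shift (m : Nat) : ∀ (t : Nat), t ≤ m →
    (List.range t).foldl
      (fun (p : List (List Int) × List Int) _ =>
        (p.1 ++ [0 :: p.2.dropLast], 0 :: p.2.dropLast))
      ([], List.replicate m 1)
    = ((List.range t).map (pvRow m),
       List.replicate t 0 ++ List.replicate (m - t) 1) := by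
  intro t ht
  induction t with
  | zero => simp
  | succ t ih =>
    rw [List.range_succ, List.foldl_append, List.foldl_cons, List.foldl_nil,
      ih (by omega)]
    have hmt : m - t = (m - t - 1) + 1 := by omega
    have hdrop : (List.replicate t (0 : Int) ++ List.replicate (m - t) (1 : Int)).dropLast
        = List.replicate t 0 ++ List.replicate (m - t - 1) 1 := by
      rw [hmt, List.replicate_succ', ← List.append_assoc, List.dropLast_concat]
      simp
    have hrow : (0 : Int) :: (List.replicate t (0 : Int) ++ List.replicate (m - t) (1 : Int)).dropLast
        = pvRow m t := by
      rw [hdrop]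
      simp [pvRow, List.replicate_succ]
    simp only [hrow]
    simp only [List.map_append, List.map_cons, List.map_nil, Prod.mk.injEq]
    refine ⟨trivial, ?_⟩
    simp [pvRow, Nat.sub_sub]

-- B equals the closed-form matrix
lemma pv_B_closed (n : Int) :
    getTournirGraph_alt n = (List.range n.toNat).map (pvRow n.toNat) := by
  unfold getTournirGraph_alt
  rw [PySem.List.pyRange_one 0 n, List.foldl_map]
  simp only [Int.sub_zero, PySem.List.slice_to_neg_one]
  rw [pv_shift n.toNat n.toNat (le_refl _)]

-- ===== VERDICT (by name: the statement is the Claim_ definition above) =====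

theorem getTournirGraph_spec : Claim_equal_getTournirGraph := by
  intro n _
  unfold Spec_getTournirGraph
  rw [pv_A_closed, pv_B_closed]
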